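-- pv_equiv track=rewrite | github.com/MorozVladislav/Python-Studying | tests/test_1.py | get_castles_number_2
-- ===== SOURCE A (Python) =====
-- def get_castles_number_2(border):
--     if len(border) == 0:
--         raise Exception('Border is empty')
--     if len(set(border)) == 1:
--         return 1
--
--     castles = 2
--     curr_direction, prev_direction = None, None
--
--     for i in range(1, len(border)):
--         if border[i] > border[i - 1]:
--             curr_direction = 1
--         elif border[i] < border[i - 1]:
--             curr_direction = -1
--
--         if prev_direction is None:
--             prev_direction = curr_direction
--             continue
--
--         if curr_direction + prev_direction == 0:
--             castles += 1
--             prev_direction = curr_direction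
--
--     return castles
-- ===== SOURCE B (Python) =====
-- def get_castles_number_2(border):
--     if len(border) == 0:
--         raise Exception('Border is empty')
--     if len(set(border)) == 1:
--         return 1
--     # Stage 1: run-length compress plateaus (keep one copy of each run).
--     comp = []
--     for x in border:
--         if not comp or x != comp[-1]:
--             comp.append(x)
--     # Stage 2: a castle boundary change is a strict local extremum of the
--     # compressed profile; answer is 2 (the two ends) plus the extrema count.
--     count = 0
--     for a, b, c in zip(comp, comp[1:], comp[2:]):
--         if (b - a) * (c - b) < 0:
--             count += 1
--     return 2 + count
-- ===== Notes on version B (the rewrite author's own statement) =====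
-- stated objective: alternative
-- what changed: Replaces A's single-pass prev/curr direction state machine with a two-stage geometric method: run-length compress plateaus, then count strict local extrema of the compressed profile via the product test (b-a)*(c-b)<0, returning 2 plus that count; no direction signs are tracked.
import Mathlib
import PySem

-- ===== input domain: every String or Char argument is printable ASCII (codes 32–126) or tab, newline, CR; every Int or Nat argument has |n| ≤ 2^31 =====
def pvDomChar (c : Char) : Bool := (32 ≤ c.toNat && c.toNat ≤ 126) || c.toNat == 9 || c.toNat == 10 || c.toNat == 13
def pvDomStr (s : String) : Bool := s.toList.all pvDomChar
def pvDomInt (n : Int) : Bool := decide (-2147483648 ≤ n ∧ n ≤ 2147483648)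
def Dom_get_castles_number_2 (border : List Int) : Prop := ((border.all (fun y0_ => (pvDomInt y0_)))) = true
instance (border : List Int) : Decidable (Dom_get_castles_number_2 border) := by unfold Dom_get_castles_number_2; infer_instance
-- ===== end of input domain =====

-- B replaces A's prev/curr direction state machine by run-length compression of
-- plateaus followed by counting strict local extrema of the compressed profile.

-- ===== PORT A =====
-- state = (castles, curr_direction, prev_direction); the loop reads border[i-1], border[i],
-- ported as a fold over the list of consecutive pairs (same values in the same order).
-- In the branch 'curr_direction + prev_direction == 0' Python's prev is non-None, and then
-- curr is non-None too (prev only ever becomes a copy of curr); the unreachable none case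
-- of curr is given an arbitrary no-op value.
def aStep (st : Int × Option Int × Option Int) (pc : Int × Int) :
    Int × Option Int × Option Int :=
  let curr : Option Int :=
    if pc.2 > pc.1 then some 1 else if pc.2 < pc.1 then some (-1) else st.2.1
  match st.2.2 with
  | none => (st.1, curr, curr)
  | some p =>
    match curr with
    | some c => if c + p = 0 then (st.1 + 1, some c, some c) else (st.1, some c, some p)
    | none => (st.1, none, some p)  -- unreachable (Python would raise TypeError here)

def get_castles_number_2 (border : List Int) : Int :=
  if border.length = 0 then 0  -- Python raises Exception('Border is empty'); outside Pre_
  else if (PySem.Set.ofList border).length = 1 then 1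
  else ((border.zip border.tail).foldl aStep (2, none, none)).1

-- ===== PORT B =====
def get_castles_number_2_alt (border : List Int) : Int :=
  if border.length = 0 then 0  -- Python raises; outside Pre_
  else if (PySem.Set.ofList border).length = 1 then 1
  else
    -- stage 1: run-length compression, 'for x in border: append x unless it repeats comp[-1]'
    let comp := border.foldl
      (fun acc x => if acc.isEmpty || acc.getLast? ≠ some x then acc ++ [x] else acc) []
    -- stage 2: count strict local extrema over triples zip(comp, comp[1:], comp[2:])
    2 + (comp.zip (comp.tail.zip comp.tail.tail)).foldl
        (fun cnt t => if (t.2.1 - t.1) * (t.2.2 - t.2.1) < 0 then cnt + 1 else cnt) 0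

-- ===== PRECONDITION & SPEC =====
-- Pre_ excludes only the empty list, on which Python A raises Exception('Border is empty').
def Pre_get_castles_number_2 (border : List Int) : Prop := border ≠ []
instance (border : List Int) : Decidable (Pre_get_castles_number_2 border) := by
  unfold Pre_get_castles_number_2; infer_instance
def pvWitness_get_castles_number_2 : List Int := [1, 3, 2]

def Spec_get_castles_number_2 (border : List Int) (out : Int) : Prop :=
  out = get_castles_number_2_alt border
instance (border : List Int) (out : Int) : Decidable (Spec_get_castles_number_2 border out) := by
  unfold Spec_get_castles_number_2; infer_instance

-- ===== CLAIM (what is proved, stated in full; the proofs are below) =====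
def Claim_equal_get_castles_number_2 : Prop :=
  ∀ (border : List Int), Dom_get_castles_number_2 border →
    Pre_get_castles_number_2 border →
    Spec_get_castles_number_2 border (get_castles_number_2 border)

-- ===== LEMMAS AND PROOFS =====

-- the sign of one step of A
def stepSign (pc : Int × Int) : Option Int :=
  if pc.2 > pc.1 then some 1 else if pc.2 < pc.1 then some (-1) else none

-- the compressed direction sequence starting from previous value v
def sgnFrom (v : Int) : List Int → List Int
  | [] => []
  | x :: t => if x = v then sgnFrom v t else (if x > v then 1 else -1) :: sgnFrom x t

-- run-length compression after a first element v
def compAux (v : Int) : List Int → List Int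
  | [] => []
  | x :: t => if x = v then compAux v t else x :: compAux x t

-- number of adjacent sign reversals
def revCnt : List Int → Int
  | x :: y :: t => (if x * y = -1 then 1 else 0) + revCnt (y :: t)
  | _ => 0

-- number of strict local extrema
def extCount : List Int → Int
  | a :: b :: c :: t => (if (b - a) * (c - b) < 0 then 1 else 0) + extCount (b :: c :: t)
  | _ => 0

-- definitional equations, used as rewrite rules
lemma sgnFrom_cons (v x : Int) (t : List Int) :
    sgnFrom v (x :: t)
      = if x = v then sgnFrom v t else (if x > v then 1 else -1) :: sgnFrom x t := rfl
lemma compAux_cons (v x : Int) (t : List Int) :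
    compAux v (x :: t) = if x = v then compAux v t else x :: compAux x t := rfl
lemma revCnt_cons2 (x y : Int) (t : List Int) :
    revCnt (x :: y :: t) = (if x * y = -1 then 1 else 0) + revCnt (y :: t) := rfl
lemma extCount_cons3 (a b c : Int) (t : List Int) :
    extCount (a :: b :: c :: t)
      = (if (b - a) * (c - b) < 0 then 1 else 0) + extCount (b :: c :: t) := rfl

-- the abstract step of A on (castles, carried sign)
def sStep (st : Int × Option Int) (t : Int) : Int × Option Int :=
  match st.2 with
  | none => (st.1, some t)
  | some p => (if t + p = 0 then st.1 + 1 else st.1, some t)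

-- A's fold, started in a state with prev = curr, equals the abstract fold over the sign list.
lemma aFold_eq_sFold (ps : List (Int × Int)) :
    ∀ (c : Int) (s : Option Int), (s = none ∨ s = some 1 ∨ s = some (-1)) →
      (ps.foldl aStep (c, s, s)).1 = ((ps.filterMap stepSign).foldl sStep (c, s)).1 := by
  induction ps with
  | nil => intro c s _; simp
  | cons pc ps ih =>
    intro c s hs
    rcases pc with ⟨p, q⟩
    by_cases h1 : q > p
    · have hstep : stepSign (p, q) = some 1 := by simp [stepSign, h1]
      rcases hs with h | h | h <;> subst h <;>
        simp only [List.filterMap_cons, hstep, List.foldl_cons, aStep, sStep, h1, if_pos] <;>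
        norm_num <;>
        first
          | exact ih c (some 1) (Or.inr (Or.inl rfl))
          | exact ih (c + 1) (some 1) (Or.inr (Or.inl rfl))
    · by_cases h2 : q < p
      · have hstep : stepSign (p, q) = some (-1) := by simp [stepSign, h1, h2]
        rcases hs with h | h | h <;> subst h <;>
          simp only [List.filterMap_cons, hstep, List.foldl_cons, aStep, sStep, h1, h2,
            if_pos] <;>
          norm_num <;>
          first
            | exact ih c (some (-1)) (Or.inr (Or.inr rfl))
            | exact ih (c + 1) (some (-1)) (Or.inr (Or.inr rfl))
      · have hstep : stepSign (p, q) = none := by simp [stepSign, h1, h2]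
        rcases hs with h | h | h <;> subst h <;>
          simp only [List.filterMap_cons, hstep, List.foldl_cons, aStep, h1, h2,
            ite_self] <;>
          norm_num <;>
          exact ih c _ (by simp)

-- the sign list of (v :: l) is sgnFrom v l
lemma signs_eq_sgnFrom (l : List Int) :
    ∀ v : Int, ((v :: l).zip l).filterMap stepSign = sgnFrom v l := by
  induction l with
  | nil => intro v; rfl
  | cons x t ih =>
    intro v
    rw [List.zip_cons_cons, sgnFrom_cons]
    by_cases h1 : x > v
    · rw [List.filterMap_cons_some (show stepSign (v, x) = some 1 by
        simp [stepSign, h1])]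
      rw [if_neg (by omega : ¬ x = v), if_pos h1, ih x]
    · by_cases h2 : x < v
      · rw [List.filterMap_cons_some (show stepSign (v, x) = some (-1) by
          simp [stepSign, h1, h2])]
        rw [if_neg (by omega : ¬ x = v), if_neg h1, ih x]
      · have hxv : x = v := by omega
        rw [List.filterMap_cons_none (show stepSign (v, x) = none by
          simp [stepSign, h1, h2]), if_pos hxv]
        subst hxv
        exact ih x

lemma sgnFrom_pm (l : List Int) : ∀ (v x : Int), x ∈ sgnFrom v l → x = 1 ∨ x = -1 := by
  induction l with
  | nil => intro v x h; simp [sgnFrom] at h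
  | cons a t ih =>
    intro v x h
    rw [sgnFrom_cons] at h
    split_ifs at h with h1 h2
    · exact ih v x h
    · rcases List.mem_cons.mp h with h | h
      · exact Or.inl h
      · exact ih a x h
    · rcases List.mem_cons.mp h with h | h
      · exact Or.inr h
      · exact ih a x h

-- the abstract fold from a carried sign equals the reversal count
lemma sFold_some_eq_revCnt (l : List Int) :
    ∀ (p c : Int), (p = 1 ∨ p = -1) → (∀ x ∈ l, x = 1 ∨ x = -1) →
      (l.foldl sStep (c, some p)).1 = c + revCnt (p :: l) := by
  induction l with
  | nil => intro p c _ _; simp [revCnt]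
  | cons t l ih =>
    intro p c hp hl
    have ht : t = 1 ∨ t = -1 := hl t (List.mem_cons_self ..)
    have hl' : ∀ x ∈ l, x = 1 ∨ x = -1 := fun x hx => hl x (List.mem_cons_of_mem _ hx)
    have hiff : (t + p = 0) ↔ (p * t = -1) := by
      rcases hp with h | h <;> rcases ht with h' | h' <;> subst h <;> subst h' <;> norm_num
    simp only [List.foldl_cons, sStep, revCnt_cons2]
    by_cases hc : t + p = 0
    · rw [if_pos hc, if_pos (hiff.mp hc), ih t (c + 1) ht hl']; ring
    · rw [if_neg hc, if_neg (fun h => hc (hiff.mpr h)), ih t c ht hl']; ring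

lemma sFold_eq_revCnt (l : List Int) (h : ∀ x ∈ l, x = 1 ∨ x = -1) :
    (l.foldl sStep ((2 : Int), (none : Option Int))).1 = 2 + revCnt l := by
  cases l with
  | nil => simp [revCnt]
  | cons p l =>
    have hp : p = 1 ∨ p = -1 := h p (List.mem_cons_self ..)
    have hl : ∀ x ∈ l, x = 1 ∨ x = -1 := fun x hx => h x (List.mem_cons_of_mem _ hx)
    simp only [List.foldl_cons, sStep]
    exact sFold_some_eq_revCnt l p 2 hp hl

-- B's compression loop equals v :: compAux v l
lemma comp_foldl_aux (l : List Int) :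
    ∀ (acc : List Int) (v : Int), acc.getLast? = some v →
      l.foldl (fun acc x => if acc.isEmpty || acc.getLast? ≠ some x then acc ++ [x] else acc) acc
        = acc ++ compAux v l := by
  induction l with
  | nil => intro acc v _; simp [compAux]
  | cons x t ih =>
    intro acc v hv
    have hne : acc.isEmpty = false := by
      cases acc with
      | nil => simp at hv
      | cons a b => rfl
    by_cases hx : x = v
    · subst hx
      have hcond : (acc.isEmpty || decide (acc.getLast? ≠ some x)) = false := by
        simp [hne, hv]
      simp only [List.foldl_cons, hcond, Bool.false_eq_true, if_false, compAux_cons]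
      exact ih acc x hv
    · have hcond : (acc.isEmpty || decide (acc.getLast? ≠ some x)) = true := by
        simp only [hne, Bool.false_or, hv, decide_eq_true_eq, ne_eq, Option.some.injEq]
        exact fun h => hx h.symm
      simp only [List.foldl_cons, hcond, if_true, compAux_cons, if_neg hx]
      rw [ih (acc ++ [x]) x (by simp), List.append_assoc]
      rfl

lemma comp_foldl (b0 : Int) (t : List Int) :
    (b0 :: t).foldl
        (fun acc x => if acc.isEmpty || acc.getLast? ≠ some x then acc ++ [x] else acc) []
      = b0 :: compAux b0 t := by
  simp only [List.foldl_cons]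
  rw [show (if (([] : List Int).isEmpty || decide (([] : List Int).getLast? ≠ some b0)) = true
        then ([] : List Int) ++ [b0] else []) = [b0] by simp]
  exact comp_foldl_aux t [b0] b0 rfl

-- the compressed list has no adjacent equal elements
lemma compAux_chain (l : List Int) : ∀ v : Int, List.IsChain (· ≠ ·) (v :: compAux v l) := by
  induction l with
  | nil => intro v; exact List.isChain_singleton v
  | cons x t ih =>
    intro v
    rw [compAux_cons]
    by_cases hx : x = v
    · rw [if_pos hx]; exact ih v
    · rw [if_neg hx]
      exact List.isChain_cons_cons.mpr ⟨fun h => hx h.symm, ih x⟩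

-- compression does not change the direction sequence
lemma sgnFrom_compAux (l : List Int) : ∀ v : Int, sgnFrom v (compAux v l) = sgnFrom v l := by
  induction l with
  | nil => intro v; rfl
  | cons x t ih =>
    intro v
    rw [compAux_cons, sgnFrom_cons]
    by_cases hx : x = v
    · rw [if_pos hx, if_pos hx]
      exact ih v
    · rw [if_neg hx, if_neg hx, sgnFrom_cons, if_neg hx, ih x]

-- on an adjacent-distinct list, sign reversals are exactly strict local extrema
lemma revCnt_eq_extCount (l : List Int) :
    ∀ v : Int, List.IsChain (· ≠ ·) (v :: l) → revCnt (sgnFrom v l) = extCount (v :: l) := by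
  induction l with
  | nil => intro v _; rfl
  | cons b t ih =>
    intro v hch
    have hvb : v ≠ b := (List.isChain_cons_cons.mp hch).1
    have hch' : List.IsChain (· ≠ ·) (b :: t) := (List.isChain_cons_cons.mp hch).2
    cases t with
    | nil =>
      rw [sgnFrom_cons, if_neg (fun h => hvb h.symm)]
      rfl
    | cons c t' =>
      have hbc : b ≠ c := (List.isChain_cons_cons.mp hch').1
      have hsb : sgnFrom b (c :: t')
          = (if c > b then (1 : Int) else -1) :: sgnFrom c t' := by
        rw [sgnFrom_cons, if_neg (fun h => hbc h.symm)]
      rw [sgnFrom_cons, if_neg (fun h => hvb h.symm), hsb, revCnt_cons2, extCount_cons3,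
        ← hsb, ih b hch']
      congr 1
      have hcase : ((if b > v then (1 : Int) else -1) * (if c > b then (1 : Int) else -1) = -1)
          ↔ ((b - v) * (c - b) < 0) := by
        by_cases h1 : b > v <;> by_cases h2 : c > b
        · rw [if_pos h1, if_pos h2]
          constructor
          · intro h; norm_num at h
          · intro h; exfalso; nlinarith
        · rw [if_pos h1, if_neg h2]
          have hcb : c < b := by omega
          constructor
          · intro _; exact mul_neg_of_pos_of_neg (by omega) (by omega)
          · intro _; norm_num
        · rw [if_neg h1, if_pos h2]
          have hbv : b < v := by omega
          constructor
          · intro _; exact mul_neg_of_neg_of_pos (by omega) (by omega)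
          · intro _; norm_num
        · rw [if_neg h1, if_neg h2]
          have hbv : b < v := by omega
          have hcb : c < b := by omega
          constructor
          · intro h; norm_num at h
          · intro h; exfalso; nlinarith
      by_cases h : (b - v) * (c - b) < 0
      · rw [if_pos h, if_pos (hcase.mpr h)]
      · rw [if_neg h, if_neg (fun hh => h (hcase.mp hh))]

-- B's triple fold equals extCount
lemma tripleFold_eq_extCount (l : List Int) :
    ∀ acc : Int,
      (l.zip (l.tail.zip l.tail.tail)).foldl
          (fun cnt t => if (t.2.1 - t.1) * (t.2.2 - t.2.1) < 0 then cnt + 1 else cnt) acc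
        = acc + extCount l := by
  induction l with
  | nil => intro acc; simp [extCount]
  | cons a t ih =>
    intro acc
    cases t with
    | nil => simp [extCount]
    | cons b t2 =>
      cases t2 with
      | nil => simp [extCount]
      | cons c t3 =>
        simp only [List.tail_cons, List.zip_cons_cons, List.foldl_cons]
        rw [show ((b :: c :: t3).zip ((c :: t3).zip t3))
            = ((b :: c :: t3).zip ((b :: c :: t3).tail.zip (b :: c :: t3).tail.tail)) from rfl]
        rw [ih, extCount_cons3]
        by_cases h : (b - a) * (c - b) < 0
        · rw [if_pos h, if_pos h]; ring
        · rw [if_neg h, if_neg h]; ring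

-- ===== VERDICT (by name: the statement is the Claim_ definition above) =====
theorem get_castles_number_2_spec : Claim_equal_get_castles_number_2 := by
  intro border _ hpre
  unfold Spec_get_castles_number_2 get_castles_number_2 get_castles_number_2_alt
  have hne : ¬ border.length = 0 := by simpa [List.length_eq_zero_iff] using hpre
  rw [if_neg hne, if_neg hne]
  by_cases hset : (PySem.Set.ofList border).length = 1
  · rw [if_pos hset, if_pos hset]
  · rw [if_neg hset, if_neg hset]
    cases border with
    | nil => exact absurd rfl hpre
    | cons b0 t =>
      rw [aFold_eq_sFold _ 2 none (Or.inl rfl)]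
      simp only [List.tail_cons]
      rw [signs_eq_sgnFrom t b0, sFold_eq_revCnt _ (sgnFrom_pm t b0), comp_foldl b0 t,
        tripleFold_eq_extCount (b0 :: compAux b0 t) 0,
        ← revCnt_eq_extCount (compAux b0 t) b0 (compAux_chain t b0),
        sgnFrom_compAux t b0]
      ring
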